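-- pv_equiv track=rewrite | github.com/UChiSeclab/wedge | code-contest-exp/scripts/cgig/constraint_stats.py | merge_all_input_status_dict
-- ===== SOURCE A (Python) =====
-- from typing import List, Dict, Tuple
--
-- def merge_all_input_status_dict(all_input_status_dict: Dict[str, Dict[str, Dict[str, str]]]) -> Dict[str, Dict[str, str]]:
--     merged_input_status_dict = {}
--     for strategy, input_status_dict in all_input_status_dict.items():
--         merged_input_status_dict[strategy] = {}
--         for input_id, solution_status_dict in input_status_dict.items():
--             for solution_id, status in solution_status_dict.items():
--                 cur_status = merged_input_status_dict[strategy].get(input_id, None)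
--                 if cur_status != "Crash":
--                     merged_input_status_dict[strategy][input_id] = status
--
--     return merged_input_status_dict
-- ===== SOURCE B (Python) =====
-- def merge_all_input_status_dict(all_input_status_dict):
--     def merge_row(input_status_dict):
--         return {input_id: ("Crash" if "Crash" in solution_status_dict.values()
--                            else list(solution_status_dict.values())[-1])
--                 for input_id, solution_status_dict in input_status_dict.items()
--                 if solution_status_dict}
--     return {strategy: merge_row(input_status_dict)
--             for strategy, input_status_dict in all_input_status_dict.items()}
-- ===== Notes on version B (the rewrite author's own statement) =====
-- stated objective: simpler
-- what changed: A merges each input_id by a stateful nested loop mutating a shared dict, overwriting the stored status until a 'Crash' locks it; B is a pair of dict comprehensions that decide each input_id's value directly (skip empty status dicts, 'Crash' if any status is 'Crash', else the last status in insertion order), with no mutation or inner state. Pre_ only excludes association lists that repeat a strategy or input_id key, which cannot arise from a Python dict argument.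
import Mathlib
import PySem

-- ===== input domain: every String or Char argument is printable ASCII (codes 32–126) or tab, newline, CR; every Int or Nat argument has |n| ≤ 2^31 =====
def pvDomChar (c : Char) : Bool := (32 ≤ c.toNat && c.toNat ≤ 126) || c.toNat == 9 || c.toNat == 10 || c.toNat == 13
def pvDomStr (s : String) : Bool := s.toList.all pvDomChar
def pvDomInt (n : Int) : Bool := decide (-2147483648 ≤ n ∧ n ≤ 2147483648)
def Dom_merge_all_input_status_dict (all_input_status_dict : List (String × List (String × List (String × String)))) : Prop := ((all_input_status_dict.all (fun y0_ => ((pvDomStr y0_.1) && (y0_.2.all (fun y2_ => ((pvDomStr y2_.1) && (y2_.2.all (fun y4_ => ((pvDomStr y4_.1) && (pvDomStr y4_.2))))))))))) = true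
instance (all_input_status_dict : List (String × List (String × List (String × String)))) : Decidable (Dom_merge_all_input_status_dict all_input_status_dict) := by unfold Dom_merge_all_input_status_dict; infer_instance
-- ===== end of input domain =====

-- B replaces A's stateful nested loop (mutating a shared dict, overwriting the stored status
-- until a "Crash" locks it) by two dict comprehensions that decide each input_id's value
-- directly (skip empty status dicts; "Crash" if present, else the last status); objective: simpler.

-- ===== PORT A =====
-- merged_input_status_dict[strategy] = {} followed by mutation of merged_input_status_dict[strategy]:
-- the inner dict is built by the nested loop and then stored under the strategy key.
def pvRowA (input_status_dict : List (String × List (String × String))) : PySem.Dict String String :=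
  input_status_dict.foldl
    (fun row p =>
      p.2.foldl
        (fun row q =>
          if row.get? p.1 ≠ some "Crash" then row.insert p.1 q.2 else row)
        row)
    PySem.Dict.empty

def merge_all_input_status_dict (all_input_status_dict : List (String × List (String × List (String × String)))) : List (String × List (String × String)) :=
  ((all_input_status_dict.foldl
      (fun merged p => merged.insert p.1 (pvRowA p.2))
      (PySem.Dict.empty : PySem.Dict String (PySem.Dict String String))).items).map
    (fun p => (p.1, p.2.items))

-- ===== PORT B =====
-- Source B's dict comprehensions: under Pre_ (unique keys) a dict comprehension over .items() is
-- exactly a filterMap / map over the association list, keeping insertion order.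
def pvMergeRow (input_status_dict : List (String × List (String × String))) : List (String × String) :=
  input_status_dict.filterMap
    (fun q =>
      if q.2 = [] then none
      else some (q.1, if "Crash" ∈ q.2.map Prod.snd then "Crash" else (q.2.map Prod.snd).getLastD ""))

def merge_all_input_status_dict_alt (all_input_status_dict : List (String × List (String × List (String × String)))) : List (String × List (String × String)) :=
  all_input_status_dict.map (fun p => (p.1, pvMergeRow p.2))

-- ===== PRECONDITION & SPEC =====
-- Pre_ excludes association lists that repeat a strategy key, or an input_id key inside one
-- strategy: such lists do not arise from a Python dict (whose keys are unique), and on that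
-- un-dict-like corner the list-as-dict reading is accidental.
def Pre_merge_all_input_status_dict (all_input_status_dict : List (String × List (String × List (String × String)))) : Prop :=
  (all_input_status_dict.map Prod.fst).Nodup ∧ ∀ p ∈ all_input_status_dict, (p.2.map Prod.fst).Nodup
instance (all_input_status_dict : List (String × List (String × List (String × String)))) : Decidable (Pre_merge_all_input_status_dict all_input_status_dict) := by unfold Pre_merge_all_input_status_dict; infer_instance

def pvWitness_merge_all_input_status_dict : (List (String × List (String × List (String × String)))) :=
  [("s1", [("i1", [("a", "Crash"), ("b", "OK")]), ("i2", [])]), ("s2", [])]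

def Spec_merge_all_input_status_dict (all_input_status_dict : List (String × List (String × List (String × String)))) (out : List (String × List (String × String))) : Prop := out = merge_all_input_status_dict_alt all_input_status_dict
instance (all_input_status_dict : List (String × List (String × List (String × String)))) (out : List (String × List (String × String))) : Decidable (Spec_merge_all_input_status_dict all_input_status_dict out) := by unfold Spec_merge_all_input_status_dict; infer_instance

-- ===== CLAIM (what is proved, stated in full; the proofs are below) =====
def Claim_equal_merge_all_input_status_dict : Prop := ∀ (all_input_status_dict : List (String × List (String × List (String × String)))), Dom_merge_all_input_status_dict all_input_status_dict → Pre_merge_all_input_status_dict all_input_status_dict → Spec_merge_all_input_status_dict all_input_status_dict (merge_all_input_status_dict all_input_status_dict)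

-- ===== LEMMAS AND PROOFS =====

theorem pv_map_id' (l : List (String × String)) (k v : String)
    (hk : k ∉ l.map Prod.fst) :
    l.map (fun p => if p.1 == k then (k, v) else p) = l := by
  conv_rhs => rw [← List.map_id l]
  apply List.map_congr_left
  intro p hp
  have : p.1 ≠ k := fun e => hk (e ▸ List.mem_map_of_mem hp)
  simp [this]

theorem pv_map_id (l : List (String × String)) (k v : String)
    (hnd : (l.map Prod.fst).Nodup) (h : (k, v) ∈ l) :
    l.map (fun p => if p.1 == k then (k, v) else p) = l := by
  induction l with
  | nil => simp at h
  | cons a t ih =>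
    rw [List.map_cons, List.nodup_cons] at hnd
    rcases List.mem_cons.mp h with h | h
    · subst h
      simp only [List.map_cons, beq_self_eq_true, if_pos]
      rw [pv_map_id' t k v hnd.1]
    · have ha : a.1 ≠ k := by
        intro e
        exact hnd.1 (e ▸ List.mem_map_of_mem h)
      rw [List.map_cons, if_neg (by simp [ha]), ih hnd.2 h]

theorem pv_insert_of_get?_eq_some (d : PySem.Dict String String) (k v : String)
    (hnd : d.keys.Nodup) (h : d.get? k = some v) : d.insert k v = d := by
  apply PySem.Dict.ext
  have hc : d.contains k = true := by
    rw [PySem.Dict.contains_eq_isSome_get?, h]; rfl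
  rw [PySem.Dict.items_insert_of_contains (h := hc)]
  have hm : (k, v) ∈ d.items := PySem.Dict.mem_items_of_get?_eq_some _ h
  have hnd' : (d.items.map Prod.fst).Nodup := hnd
  exact pv_map_id d.items k v hnd' hm

theorem pv_lockFold (vs : List String) (v : String) :
    vs.foldl (fun c s => if c = "Crash" then c else s) v
      = if v = "Crash" ∨ "Crash" ∈ vs then "Crash" else vs.getLastD v := by
  induction vs generalizing v with
  | nil => by_cases h : v = "Crash" <;> simp [h]
  | cons s t ih =>
    rw [List.foldl_cons]
    by_cases h : v = "Crash"
    · simp only [h, ih]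
      simp
    · rw [if_neg h, ih]
      by_cases hs : s = "Crash" ∨ "Crash" ∈ t
      · rw [if_pos hs, if_pos]
        exact Or.inr (by rcases hs with hs | hs <;> simp [hs])
      · rw [if_neg hs, if_neg, List.getLastD_cons]
        rintro (hv | hv)
        · exact h hv
        · rcases List.mem_cons.mp hv with e | e
          · exact hs (Or.inl e.symm)
          · exact hs (Or.inr e)

theorem pv_inner_locked (ssd : List (String × String)) (row : PySem.Dict String String)
    (iid v : String) (hnd : row.keys.Nodup) (h : row.get? iid = some v) :
    ssd.foldl (fun r q => if r.get? iid ≠ some "Crash" then r.insert iid q.2 else r) row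
      = row.insert iid ((ssd.map Prod.snd).foldl (fun c s => if c = "Crash" then c else s) v) := by
  induction ssd generalizing row v with
  | nil =>
    simp only [List.foldl_nil, List.map_nil]
    exact (pv_insert_of_get?_eq_some row iid v hnd h).symm
  | cons q t ih =>
    rw [List.foldl_cons, List.map_cons, List.foldl_cons]
    by_cases hv : v = "Crash"
    · have hget : row.get? iid = some "Crash" := hv ▸ h
      rw [if_neg (by simp [hget]), ih row v hnd h, hv, if_pos rfl]
    · have hcond : row.get? iid ≠ some "Crash" := by
        rw [h]; intro e; exact hv (Option.some.injEq .. ▸ e)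
      rw [if_pos hcond, if_neg hv,
        ih (row.insert iid q.2) q.2 (PySem.Dict.nodup_keys_insert _ _ _ hnd)
          (PySem.Dict.get?_insert_self _ _ _),
        PySem.Dict.insert_insert_self]

theorem pv_step (iid : String) (ssd : List (String × String)) (row : PySem.Dict String String)
    (hnd : row.keys.Nodup) (h : row.get? iid = none) :
    ssd.foldl (fun r q => if r.get? iid ≠ some "Crash" then r.insert iid q.2 else r) row
      = (if ssd = [] then row
         else row.insert iid (if "Crash" ∈ ssd.map Prod.snd then "Crash" else (ssd.map Prod.snd).getLastD "")) := by
  cases ssd with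
  | nil => simp
  | cons q t =>
    rw [List.foldl_cons, if_pos (by simp [h]),
      pv_inner_locked t (row.insert iid q.2) iid q.2 (PySem.Dict.nodup_keys_insert _ _ _ hnd)
        (PySem.Dict.get?_insert_self _ _ _),
      PySem.Dict.insert_insert_self, if_neg (by simp), pv_lockFold]
    congr 1
    rw [List.map_cons, List.getLastD_cons]
    by_cases hc : q.2 = "Crash" ∨ "Crash" ∈ t.map Prod.snd
    · rw [if_pos hc, if_pos (by rcases hc with hc | hc <;> simp [hc])]
    · rw [if_neg hc, if_neg]
      intro hv
      rcases List.mem_cons.mp hv with e | e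
      · exact hc (Or.inl e.symm)
      · exact hc (Or.inr e)

-- A's inner nested loop, started from a dict whose keys avoid isd's keys, appends exactly
-- B's merge_row list to the items.
theorem pv_rowA_items (isd : List (String × List (String × String))) (d : PySem.Dict String String)
    (hk : (isd.map Prod.fst).Nodup) (hnd : d.keys.Nodup)
    (hfresh : ∀ k ∈ isd.map Prod.fst, d.get? k = none) :
    (isd.foldl (fun row p => p.2.foldl (fun r q => if r.get? p.1 ≠ some "Crash" then r.insert p.1 q.2 else r) row) d).items
      = d.items ++ pvMergeRow isd := by
  induction isd generalizing d with
  | nil => simp [pvMergeRow]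
  | cons p t ih =>
    rw [List.map_cons, List.nodup_cons] at hk
    have hfresh0 : d.get? p.1 = none := hfresh p.1 (by simp)
    rw [List.foldl_cons, pv_step p.1 p.2 d hnd hfresh0]
    by_cases he : p.2 = []
    · rw [if_pos he, ih d hk.2 hnd (fun k hkmem => hfresh k (by simp [hkmem]))]
      simp [pvMergeRow, he]
    · rw [if_neg he]
      have hc : d.contains p.1 = false := by
        rw [PySem.Dict.contains_eq_isSome_get?, hfresh0]; rfl
      rw [ih _ hk.2 (PySem.Dict.nodup_keys_insert _ _ _ hnd)
            (fun k hkmem => by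
              have hne : k ≠ p.1 := fun e => hk.1 (e ▸ hkmem)
              rw [PySem.Dict.get?_insert_of_ne (hne := hne)]
              exact hfresh k (by simp [hkmem])),
          PySem.Dict.items_insert_of_not_contains (h := hc)]
      simp [pvMergeRow, he]

theorem pvRowA_items_eq (isd : List (String × List (String × String)))
    (hk : (isd.map Prod.fst).Nodup) : (pvRowA isd).items = pvMergeRow isd := by
  unfold pvRowA
  rw [pv_rowA_items isd PySem.Dict.empty hk PySem.Dict.nodup_keys_empty
      (fun k _ => PySem.Dict.get?_empty _)]
  rfl

-- ===== VERDICT (by name: the statement is the Claim_ definition above) =====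
theorem merge_all_input_status_dict_spec : Claim_equal_merge_all_input_status_dict := by
  intro l _hdom hpre
  unfold Spec_merge_all_input_status_dict merge_all_input_status_dict merge_all_input_status_dict_alt
  rw [PySem.Dict.items_foldl_insert_fresh (hdis := fun a _ => PySem.Dict.contains_empty _)
      (hnd := hpre.1)]
  rw [show (PySem.Dict.empty : PySem.Dict String (PySem.Dict String String)).items = [] from rfl,
    List.nil_append, List.map_map]
  apply List.map_congr_left
  intro p hp
  simp only [Function.comp]
  rw [pvRowA_items_eq p.2 (hpre.2 p hp)]
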